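-- pv_equiv track=rewrite | github.com/VMahajan10/Content-Automation-Prototype | app.py | extract_meaningful_description_from_content
-- ===== SOURCE A (Python) =====
-- def extract_meaningful_description_from_content(content, training_context):
--     """
--     Extract a meaningful description from content chunk
--     """
--     try:
--         # Analyze content to create a meaningful description
--         content_lower = content.lower()
--
--         # Determine the type of content based on keywords
--         if any(word in content_lower for word in ['responsibilities', 'duties', 'roles']):
--             return "Overview of job responsibilities, duties, and role expectations"
--         elif any(word in content_lower for word in ['procedures', 'processes', 'steps']):
--             return "Step-by-step procedures and processes for effective execution"
--         elif any(word in content_lower for word in ['guidelines', 'standards', 'requirements']):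
--             return "Guidelines, standards, and requirements for compliance"
--         elif any(word in content_lower for word in ['objectives', 'goals', 'targets']):
--             return "Key objectives, goals, and performance targets"
--         elif any(word in content_lower for word in ['safety', 'security', 'protection']):
--             return "Safety procedures and security guidelines"
--         elif any(word in content_lower for word in ['quality', 'control', 'assurance']):
--             return "Quality control measures and assurance procedures"
--         elif any(word in content_lower for word in ['training', 'development', 'learning']):
--             return "Training procedures and professional development guidelines"
--         elif any(word in content_lower for word in ['management', 'leadership', 'supervision']):
--             return "Management and leadership principles and practices"
--         elif any(word in content_lower for word in ['communication', 'interaction', 'collaboration']):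
--             return "Communication strategies and collaboration techniques"
--         elif any(word in content_lower for word in ['customer', 'client', 'service']):
--             return "Customer service principles and client interaction guidelines"
--         else:
--             return "Essential training content and operational procedures"
--
--     except Exception as e:
--         return "Training content covering key procedures and guidelines"
-- ===== SOURCE B (Python) =====
-- # B: instead of an ordered first-match elif chain, map every keyword to its
-- # category index in one flat dict, compute the minimum index among ALL matched
-- # keywords, and use that index to select the description.  Because A's chain
-- # checks categories in index order, "first matching category" == "minimum
-- # matched category index", so the results coincide.
--
-- _KEYWORD_CATEGORY = {
--     'responsibilities': 0, 'duties': 0, 'roles': 0,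
--     'procedures': 1, 'processes': 1, 'steps': 1,
--     'guidelines': 2, 'standards': 2, 'requirements': 2,
--     'objectives': 3, 'goals': 3, 'targets': 3,
--     'safety': 4, 'security': 4, 'protection': 4,
--     'quality': 5, 'control': 5, 'assurance': 5,
--     'training': 6, 'development': 6, 'learning': 6,
--     'management': 7, 'leadership': 7, 'supervision': 7,
--     'communication': 8, 'interaction': 8, 'collaboration': 8,
--     'customer': 9, 'client': 9, 'service': 9,
-- }
--
-- _DESCRIPTIONS = [
--     "Overview of job responsibilities, duties, and role expectations",
--     "Step-by-step procedures and processes for effective execution",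
--     "Guidelines, standards, and requirements for compliance",
--     "Key objectives, goals, and performance targets",
--     "Safety procedures and security guidelines",
--     "Quality control measures and assurance procedures",
--     "Training procedures and professional development guidelines",
--     "Management and leadership principles and practices",
--     "Communication strategies and collaboration techniques",
--     "Customer service principles and client interaction guidelines",
--     "Essential training content and operational procedures",
-- ]
--
--
-- def extract_meaningful_description_from_content(content, training_context):
--     """Extract a meaningful description from content chunk (min matched category index)."""
--     try:
--         content_lower = content.lower()
--         idx = min((i for kw, i in _KEYWORD_CATEGORY.items() if kw in content_lower),
--                   default=len(_DESCRIPTIONS) - 1)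
--         return _DESCRIPTIONS[idx]
--     except Exception:
--         return "Training content covering key procedures and guidelines"
-- ===== Notes on version B (the rewrite author's own statement) =====
-- stated objective: alternative
-- what changed: Replaces the ordered ten-branch early-return elif chain with a flat keyword-to-category-index map: B collects every matched keyword's index, takes the minimum (defaulting to the last index), and selects the description by that index; first matching category equals minimum matched index because A checks categories in index order.
import Mathlib
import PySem

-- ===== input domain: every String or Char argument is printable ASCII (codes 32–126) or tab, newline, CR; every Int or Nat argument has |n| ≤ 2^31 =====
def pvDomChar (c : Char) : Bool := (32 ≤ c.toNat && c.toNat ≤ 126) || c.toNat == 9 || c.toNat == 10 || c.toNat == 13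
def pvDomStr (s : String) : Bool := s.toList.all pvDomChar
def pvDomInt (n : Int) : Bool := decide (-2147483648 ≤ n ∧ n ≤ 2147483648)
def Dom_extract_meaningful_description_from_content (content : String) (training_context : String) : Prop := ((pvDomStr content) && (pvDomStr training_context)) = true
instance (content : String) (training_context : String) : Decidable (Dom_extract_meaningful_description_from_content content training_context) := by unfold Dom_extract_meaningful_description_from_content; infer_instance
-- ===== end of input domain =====

-- B replaces A's ordered elif chain by a flat keyword->category-index map, taking the minimum matched index into a description array; objective: alternative (same cost, different selection mechanism).


-- ===== PORT A =====
-- Literal port of A's elif chain.  The Python try/except cannot fire for a String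
-- argument (content.lower() is total on str), so no exception path is needed.
def extract_meaningful_description_from_content (content : String) (training_context : String) : String :=
  let content_lower := PySem.Str.lower content
  if ["responsibilities", "duties", "roles"].any (fun word => PySem.Str.isIn word content_lower) then
    "Overview of job responsibilities, duties, and role expectations"
  else if ["procedures", "processes", "steps"].any (fun word => PySem.Str.isIn word content_lower) then
    "Step-by-step procedures and processes for effective execution"
  else if ["guidelines", "standards", "requirements"].any (fun word => PySem.Str.isIn word content_lower) then
    "Guidelines, standards, and requirements for compliance"
  else if ["objectives", "goals", "targets"].any (fun word => PySem.Str.isIn word content_lower) then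
    "Key objectives, goals, and performance targets"
  else if ["safety", "security", "protection"].any (fun word => PySem.Str.isIn word content_lower) then
    "Safety procedures and security guidelines"
  else if ["quality", "control", "assurance"].any (fun word => PySem.Str.isIn word content_lower) then
    "Quality control measures and assurance procedures"
  else if ["training", "development", "learning"].any (fun word => PySem.Str.isIn word content_lower) then
    "Training procedures and professional development guidelines"
  else if ["management", "leadership", "supervision"].any (fun word => PySem.Str.isIn word content_lower) then
    "Management and leadership principles and practices"
  else if ["communication", "interaction", "collaboration"].any (fun word => PySem.Str.isIn word content_lower) then
    "Communication strategies and collaboration techniques"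
  else if ["customer", "client", "service"].any (fun word => PySem.Str.isIn word content_lower) then
    "Customer service principles and client interaction guidelines"
  else
    "Essential training content and operational procedures"

-- ===== PORT B =====
-- Source B's _KEYWORD_CATEGORY dict as an association list (keys are distinct).
def pvKeywordCategory : List (String × Nat) :=
  [ ("responsibilities", 0), ("duties", 0), ("roles", 0),
    ("procedures", 1), ("processes", 1), ("steps", 1),
    ("guidelines", 2), ("standards", 2), ("requirements", 2),
    ("objectives", 3), ("goals", 3), ("targets", 3),
    ("safety", 4), ("security", 4), ("protection", 4),
    ("quality", 5), ("control", 5), ("assurance", 5),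
    ("training", 6), ("development", 6), ("learning", 6),
    ("management", 7), ("leadership", 7), ("supervision", 7),
    ("communication", 8), ("interaction", 8), ("collaboration", 8),
    ("customer", 9), ("client", 9), ("service", 9) ]

-- Source B's _DESCRIPTIONS list (the default text is its last element, index 10).
def pvDescriptions : List String :=
  [ "Overview of job responsibilities, duties, and role expectations",
    "Step-by-step procedures and processes for effective execution",
    "Guidelines, standards, and requirements for compliance",
    "Key objectives, goals, and performance targets",
    "Safety procedures and security guidelines",
    "Quality control measures and assurance procedures",
    "Training procedures and professional development guidelines",
    "Management and leadership principles and practices",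
    "Communication strategies and collaboration techniques",
    "Customer service principles and client interaction guidelines",
    "Essential training content and operational procedures" ]

-- Source B's  min((i for kw, i in _KEYWORD_CATEGORY.items() if kw in content_lower),
--         default=len(_DESCRIPTIONS) - 1)
-- ported as a fold of min over the matched indices, starting from the default 10
-- (exact: the default 10 exceeds every stored index, so folding from it equals
-- Python's min-with-default).
def extract_meaningful_description_from_content_alt (content : String) (training_context : String) : String :=
  let content_lower := PySem.Str.lower content
  let idx := pvKeywordCategory.foldl
    (fun acc p => if PySem.Str.isIn p.1 content_lower then min acc p.2 else acc)
    (pvDescriptions.length - 1)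
  pvDescriptions.getD idx ""

-- ===== PRECONDITION & SPEC =====
def Spec_extract_meaningful_description_from_content (content : String) (training_context : String) (out : String) : Prop := out = extract_meaningful_description_from_content_alt content training_context
instance (content : String) (training_context : String) (out : String) : Decidable (Spec_extract_meaningful_description_from_content content training_context out) := by unfold Spec_extract_meaningful_description_from_content; infer_instance

-- ===== CLAIM (what is proved, stated in full; the proofs are below) =====
def Claim_equal_extract_meaningful_description_from_content : Prop := ∀ (content : String) (training_context : String), Dom_extract_meaningful_description_from_content content training_context → Spec_extract_meaningful_description_from_content content training_context (extract_meaningful_description_from_content content training_context)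

-- ===== LEMMAS AND PROOFS =====

-- One min-accumulation step, abstracted over the (already decided) match bit.
def pvG (b : Bool) (i acc : Nat) : Nat := if b then min acc i else acc

-- Folding B's step over one 3-keyword category block equals a single pvG step
-- driven by "any keyword of the block occurs".
lemma pvStep3 (low a b c : String) (i acc : Nat) :
    List.foldl (fun acc (p : String × Nat) => if PySem.Str.isIn p.1 low then min acc p.2 else acc)
      acc [(a, i), (b, i), (c, i)]
      = pvG ([a, b, c].any (fun w => PySem.Str.isIn w low)) i acc := by
  cases ha : PySem.Str.isIn a low <;>
  cases hb : PySem.Str.isIn b low <;>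
  cases hc : PySem.Str.isIn c low <;>
    simp only [List.foldl_cons, List.foldl_nil, List.any_cons, List.any_nil] <;>
    simp only [ha, hb, hc] <;>
    simp [pvG]

-- The finite heart of the equivalence: for any values of the ten category-match
-- bits, A's elif chain picks the same description as indexing by the minimum
-- matched index.
lemma pvBridge (b0 b1 b2 b3 b4 b5 b6 b7 b8 b9 : Bool) :
    (if b0 then "Overview of job responsibilities, duties, and role expectations"
     else if b1 then "Step-by-step procedures and processes for effective execution"
     else if b2 then "Guidelines, standards, and requirements for compliance"
     else if b3 then "Key objectives, goals, and performance targets"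
     else if b4 then "Safety procedures and security guidelines"
     else if b5 then "Quality control measures and assurance procedures"
     else if b6 then "Training procedures and professional development guidelines"
     else if b7 then "Management and leadership principles and practices"
     else if b8 then "Communication strategies and collaboration techniques"
     else if b9 then "Customer service principles and client interaction guidelines"
     else "Essential training content and operational procedures")
    = pvDescriptions.getD
        (pvG b9 9 (pvG b8 8 (pvG b7 7 (pvG b6 6 (pvG b5 5 (pvG b4 4 (pvG b3 3
          (pvG b2 2 (pvG b1 1 (pvG b0 0 10)))))))))) "" := by
  revert b0 b1 b2 b3 b4 b5 b6 b7 b8 b9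
  decide

-- ===== VERDICT (by name: the statement is the Claim_ definition above) =====
theorem extract_meaningful_description_from_content_spec : Claim_equal_extract_meaningful_description_from_content := by
  intro content training_context _
  unfold Spec_extract_meaningful_description_from_content
  unfold extract_meaningful_description_from_content extract_meaningful_description_from_content_alt
  have hsplit : pvKeywordCategory =
      [("responsibilities", 0), ("duties", 0), ("roles", 0)] ++
      ([("procedures", 1), ("processes", 1), ("steps", 1)] ++
      ([("guidelines", 2), ("standards", 2), ("requirements", 2)] ++
      ([("objectives", 3), ("goals", 3), ("targets", 3)] ++
      ([("safety", 4), ("security", 4), ("protection", 4)] ++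
      ([("quality", 5), ("control", 5), ("assurance", 5)] ++
      ([("training", 6), ("development", 6), ("learning", 6)] ++
      ([("management", 7), ("leadership", 7), ("supervision", 7)] ++
      ([("communication", 8), ("interaction", 8), ("collaboration", 8)] ++
       [("customer", 9), ("client", 9), ("service", 9)])))))))) := rfl
  simp only [hsplit, List.foldl_append, pvStep3]
  exact pvBridge _ _ _ _ _ _ _ _ _ _
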